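-- pv_equiv track=rewrite | github.com/Iwazo8700/MC102 | lab16.py | pagsResposta
-- ===== SOURCE A (Python) =====
-- def pagsResposta(palavrasPagina, termosBusca):
--     lista = []
--     v = False
--     for frase in palavrasPagina:#laço encaixado para verificar a acorrencia de cada palavra
--         frase = frase.split()
--         for termo in termosBusca:
--             if termo in frase:
--                 v = True
--             else:
--                 v = False #se um dos termos ja não estiver dá break e append 0
--                 break
--         if v:
--             lista.append(1)
--         else:
--             lista.append(0)
--     return lista
-- ===== SOURCE B (Python) =====
-- def pagsResposta(palavrasPagina, termosBusca):
--     n = len(palavrasPagina)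
--     if not termosBusca:
--         return [0] * n
--     # inverted index: word -> set of page indices whose word list contains it
--     index = {}
--     for i, page in enumerate(palavrasPagina):
--         for w in page.split():
--             index.setdefault(w, set()).add(i)
--     # intersect the posting sets of all search terms
--     hits = index.get(termosBusca[0], set())
--     for t in termosBusca[1:]:
--         hits = hits & index.get(t, set())
--     return [1 if i in hits else 0 for i in range(n)]
-- ===== Notes on version B (the rewrite author's own statement) =====
-- stated objective: alternative
-- what changed: Replaces A's page-by-page scan with a threaded break-flag (term membership re-scanned per page) by an inverted index (word -> set of page indices) built once, after which the answer is the intersection of the search terms' posting sets rendered as a 0/1 vector over range(n).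
import Mathlib
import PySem

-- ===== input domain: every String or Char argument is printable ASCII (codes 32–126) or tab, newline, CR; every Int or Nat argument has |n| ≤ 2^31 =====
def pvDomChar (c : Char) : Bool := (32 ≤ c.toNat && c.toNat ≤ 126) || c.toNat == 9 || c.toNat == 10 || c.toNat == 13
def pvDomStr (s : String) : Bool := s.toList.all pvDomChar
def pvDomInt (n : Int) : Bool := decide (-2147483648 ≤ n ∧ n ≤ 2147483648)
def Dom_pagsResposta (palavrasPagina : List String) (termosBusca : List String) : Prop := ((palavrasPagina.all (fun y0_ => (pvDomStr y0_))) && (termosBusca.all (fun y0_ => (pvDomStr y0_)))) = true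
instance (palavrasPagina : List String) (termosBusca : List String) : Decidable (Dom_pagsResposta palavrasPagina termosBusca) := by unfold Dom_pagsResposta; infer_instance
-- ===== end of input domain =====

-- B replaces A's page-by-page nested scan (break-flag threaded across pages) by an inverted
-- index (word -> posting set of page indices) intersected over the search terms; objective: alternative.

-- ===== PORT A =====
-- inner 'for termo in termosBusca' loop: threads the flag v, breaks (returns false) on first miss
def pagsA_inner (termos : List String) (frase : List String) (v : Bool) : Bool :=
  match termos with
  | [] => v
  | t :: ts => if frase.contains t then pagsA_inner ts frase true else false

def pagsA_step (termosBusca : List String) (st : List Int × Bool) (frase : String) : List Int × Bool :=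
  let f := PySem.Str.split₀ frase                -- frase = frase.split()
  let v := pagsA_inner termosBusca f st.2        -- the inner for-loop updating v
  (st.1 ++ [if v then (1 : Int) else 0], v)      -- lista.append(1 if v else 0)

def pagsResposta (palavrasPagina : List String) (termosBusca : List String) : List Int :=
  (palavrasPagina.foldl (pagsA_step termosBusca) ([], false)).1

-- ===== PORT B =====
-- 'for i, page in enumerate(...): for w in page.split(): index.setdefault(w, set()).add(i)'
def pagsB_index (palavrasPagina : List String) : PySem.Dict String (PySem.Set Int) :=
  (PySem.List.enumerate palavrasPagina 0).foldl
    (fun d p => (PySem.Str.split₀ p.2).foldl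
        (fun d w => d.modify w PySem.Set.empty (fun s => PySem.Set.add s p.1)) d)
    PySem.Dict.empty

def pagsResposta_alt (palavrasPagina : List String) (termosBusca : List String) : List Int :=
  match termosBusca with
  | [] => List.replicate palavrasPagina.length (0 : Int)      -- if not termosBusca: return [0]*n
  | t0 :: rest =>
    let idx := pagsB_index palavrasPagina
    let hits := rest.foldl
      (fun h t => PySem.Set.inter h (idx.getD t PySem.Set.empty))
      (idx.getD t0 PySem.Set.empty)
    (PySem.List.pyRange 0 (palavrasPagina.length : Int) 1).map
      (fun i => if PySem.Set.contains hits i then (1 : Int) else 0)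

-- ===== PRECONDITION & SPEC =====
def Spec_pagsResposta (palavrasPagina : List String) (termosBusca : List String) (out : List Int) : Prop := out = pagsResposta_alt palavrasPagina termosBusca
instance (palavrasPagina : List String) (termosBusca : List String) (out : List Int) : Decidable (Spec_pagsResposta palavrasPagina termosBusca out) := by unfold Spec_pagsResposta; infer_instance

-- ===== CLAIM (what is proved, stated in full; the proofs are below) =====
def Claim_equal_pagsResposta : Prop := ∀ (palavrasPagina : List String) (termosBusca : List String), Dom_pagsResposta palavrasPagina termosBusca → Spec_pagsResposta palavrasPagina termosBusca (pagsResposta palavrasPagina termosBusca)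

-- ===== LEMMAS AND PROOFS =====

-- ---- A side: characterise the fold ----

theorem pagsA_inner_all (termos frase : List String) (v : Bool) (h : termos ≠ []) :
    pagsA_inner termos frase v = termos.all (fun t => frase.contains t) := by
  induction termos generalizing v with
  | nil => exact absurd rfl h
  | cons t ts ih =>
    by_cases hts : ts = []
    · subst hts; simp [pagsA_inner]
    · simp [pagsA_inner, ih _ hts]

theorem pagsA_fold_nil (pp : List String) (acc : List Int) :
    (pp.foldl (pagsA_step []) (acc, false)).1 = acc ++ List.replicate pp.length (0 : Int) := by
  induction pp generalizing acc with
  | nil => simp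
  | cons p pp ih =>
    rw [List.foldl_cons]
    show (pp.foldl (pagsA_step []) (acc ++ [(0:Int)], false)).1 = _
    rw [ih]; simp [List.replicate_succ]

theorem pagsA_fold_cons (pp ts : List String) (hts : ts ≠ []) (acc : List Int) (v : Bool) :
    (pp.foldl (pagsA_step ts) (acc, v)).1
      = acc ++ pp.map (fun p =>
          if ts.all (fun t => (PySem.Str.split₀ p).contains t) then (1 : Int) else 0) := by
  induction pp generalizing acc v with
  | nil => simp
  | cons p pp ih =>
    rw [List.foldl_cons]
    show (pp.foldl (pagsA_step ts)
        (acc ++ [if pagsA_inner ts (PySem.Str.split₀ p) v then (1:Int) else 0],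
         pagsA_inner ts (PySem.Str.split₀ p) v)).1 = _
    rw [pagsA_inner_all ts _ _ hts, ih]
    simp

-- ---- B side: membership in the inverted index ----

theorem set_mem_add {α : Type} [BEq α] [LawfulBEq α] (s : PySem.Set α) (x y : α) :
    y ∈ PySem.Set.add s x ↔ y ∈ s ∨ y = x := by
  simp [PySem.Set.add]
  split_ifs with h
  · constructor
    · exact Or.inl
    · rintro (h' | rfl)
      · exact h'
      · simpa using h
  · simp [or_comm]

-- the inner word loop: lookup after the loop
theorem pagsB_inner_getD (ws : List String) (d : PySem.Dict String (PySem.Set Int))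
    (j : Int) (t : String) :
    ((ws.foldl (fun d w => d.modify w PySem.Set.empty (fun s => PySem.Set.add s j)) d).getD t PySem.Set.empty)
      = if t ∈ ws then PySem.Set.add (d.getD t PySem.Set.empty) j else d.getD t PySem.Set.empty := by
  induction ws generalizing d with
  | nil => simp
  | cons w ws ih =>
    rw [List.foldl_cons, ih]
    rw [PySem.Dict.getD_modify]
    by_cases hw : t = w
    · subst hw
      by_cases hmem : t ∈ ws <;>
        simp [hmem, PySem.Set.add, PySem.Set.contains]
      split_ifs with h1 <;> simp_all
    · simp [hw, List.mem_cons]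

-- the outer page loop: membership in a posting set
theorem pagsB_outer_mem (L : List (Int × String)) (d : PySem.Dict String (PySem.Set Int))
    (t : String) (i : Int) :
    i ∈ ((L.foldl (fun d p => (PySem.Str.split₀ p.2).foldl
            (fun d w => d.modify w PySem.Set.empty (fun s => PySem.Set.add s p.1)) d) d).getD t PySem.Set.empty)
      ↔ i ∈ d.getD t PySem.Set.empty ∨ ∃ p ∈ L, i = p.1 ∧ t ∈ PySem.Str.split₀ p.2 := by
  induction L generalizing d with
  | nil => simp
  | cons p L ih =>
    rw [List.foldl_cons, ih, pagsB_inner_getD]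
    by_cases hmem : t ∈ PySem.Str.split₀ p.2
    · rw [if_pos hmem, set_mem_add]
      constructor
      · rintro ((h | rfl) | h)
        · exact Or.inl h
        · exact Or.inr ⟨p, by simp, rfl, hmem⟩
        · obtain ⟨q, hq, h1, h2⟩ := h
          exact Or.inr ⟨q, by simp [hq], h1, h2⟩
      · rintro (h | ⟨q, hq, h1, h2⟩)
        · exact Or.inl (Or.inl h)
        · rcases List.mem_cons.mp hq with rfl | hq'
          · exact Or.inl (Or.inr h1)
          · exact Or.inr ⟨q, hq', h1, h2⟩
    · rw [if_neg hmem]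
      constructor
      · rintro (h | ⟨q, hq, h1, h2⟩)
        · exact Or.inl h
        · exact Or.inr ⟨q, by simp [hq], h1, h2⟩
      · rintro (h | ⟨q, hq, h1, h2⟩)
        · exact Or.inl h
        · rcases List.mem_cons.mp hq with rfl | hq'
          · exact absurd h2 hmem
          · exact Or.inr ⟨q, hq', h1, h2⟩

theorem pagsB_index_mem (pp : List String) (t : String) (i : Int) :
    i ∈ ((pagsB_index pp).getD t PySem.Set.empty)
      ↔ ∃ k : Nat, k < pp.length ∧ i = (k : Int) ∧ t ∈ PySem.Str.split₀ (pp.getD k "") := by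
  unfold pagsB_index
  rw [pagsB_outer_mem, PySem.List.enumerate_eq_map_pyRange pp ""]
  simp only [List.mem_map, PySem.Dict.getD_empty, PySem.List.len_eq]
  constructor
  · rintro (h | ⟨p, ⟨j, hj, rfl⟩, h1, h2⟩)
    · simp [PySem.Set.empty] at h
    · rw [PySem.List.mem_pyRange_one] at hj
      refine ⟨j.toNat, by omega, by omega, ?_⟩
      rwa [PySem.List.pyGetD_of_nonneg pp "" hj.1] at h2
  · rintro ⟨k, hk, rfl, h2⟩
    refine Or.inr ⟨((k : Int), PySem.List.pyGetD pp (k : Int) ""), ⟨(k : Int), ?_, rfl⟩, rfl, ?_⟩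
    · rw [PySem.List.mem_pyRange_one]; omega
    · rwa [PySem.List.pyGetD_natCast]

-- ---- B side: membership in the intersection fold ----

theorem set_mem_inter {α : Type} [BEq α] [LawfulBEq α] (s t : PySem.Set α) (x : α) :
    x ∈ PySem.Set.inter s t ↔ x ∈ s ∧ x ∈ t := by
  simp [PySem.Set.inter, PySem.Set.contains, List.contains_eq_mem]

theorem pagsB_hits_mem (rest : List String) (idx : PySem.Dict String (PySem.Set Int))
    (h0 : PySem.Set Int) (i : Int) :
    i ∈ rest.foldl (fun h t => PySem.Set.inter h (idx.getD t PySem.Set.empty)) h0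
      ↔ i ∈ h0 ∧ ∀ t ∈ rest, i ∈ idx.getD t PySem.Set.empty := by
  induction rest generalizing h0 with
  | nil => simp
  | cons t rest ih =>
    rw [List.foldl_cons, ih, set_mem_inter]
    constructor
    · rintro ⟨⟨h1, h2⟩, h3⟩
      exact ⟨h1, by intro u hu; rcases List.mem_cons.mp hu with rfl | hu'; exact h2; exact h3 u hu'⟩
    · rintro ⟨h1, h2⟩
      exact ⟨⟨h1, h2 t (by simp)⟩, fun u hu => h2 u (by simp [hu])⟩

-- contains on a Set Int as membership
theorem set_contains_iff (s : PySem.Set Int) (i : Int) :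
    PySem.Set.contains s i = true ↔ i ∈ s := by
  simp [PySem.Set.contains, List.contains_eq_mem]

-- ===== VERDICT (by name: the statement is the Claim_ definition above) =====
theorem pagsResposta_spec : Claim_equal_pagsResposta := by
  intro pp ts _
  unfold Spec_pagsResposta pagsResposta pagsResposta_alt
  match ts with
  | [] => simpa using pagsA_fold_nil pp []
  | t0 :: rest =>
    rw [pagsA_fold_cons pp (t0 :: rest) (by simp) [] false]
    simp only [List.nil_append]
    apply List.ext_getElem
    · simp [PySem.List.length_pyRange_one]
    · intro k hk1 hk2
      simp only [List.getElem_map, PySem.List.getElem_pyRange_one]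
      have hk : k < pp.length := by simpa using hk1
      have hgetD : pp.getD k "" = pp[k] := List.getD_eq_getElem pp "" hk
      have hmem :
          PySem.Set.contains (rest.foldl
            (fun h t => PySem.Set.inter h ((pagsB_index pp).getD t PySem.Set.empty))
            ((pagsB_index pp).getD t0 PySem.Set.empty)) ((0:Int) + k) = true
          ↔ (∀ t ∈ t0 :: rest, t ∈ PySem.Str.split₀ pp[k]) := by
        rw [set_contains_iff, pagsB_hits_mem]
        constructor
        · rintro ⟨h1, h2⟩
          intro t ht
          rcases List.mem_cons.mp ht with rfl | ht'
          · obtain ⟨j, hj1, hj2, hj3⟩ := (pagsB_index_mem pp t ((0:Int)+k)).mp h1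
            have hjk : j = k := by omega
            subst hjk; rwa [hgetD] at hj3
          · obtain ⟨j, hj1, hj2, hj3⟩ := (pagsB_index_mem pp t ((0:Int)+k)).mp (h2 t ht')
            have hjk : j = k := by omega
            subst hjk; rwa [hgetD] at hj3
        · intro h
          refine ⟨(pagsB_index_mem pp t0 _).mpr ⟨k, hk, by omega, by rw [hgetD]; exact h t0 (by simp)⟩, ?_⟩
          intro t ht
          exact (pagsB_index_mem pp t _).mpr ⟨k, hk, by omega, by rw [hgetD]; exact h t (by simp [ht])⟩
      have hall_iff :
          (((t0 :: rest).all fun t => (PySem.Str.split₀ pp[k]).contains t) = true)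
          ↔ (∀ t ∈ t0 :: rest, t ∈ PySem.Str.split₀ pp[k]) := by
        simp [List.all_eq_true, List.contains_eq_mem]
      by_cases hall : ∀ t ∈ t0 :: rest, t ∈ PySem.Str.split₀ pp[k]
      · rw [if_pos (hall_iff.mpr hall), if_pos (hmem.mpr hall)]
      · rw [if_neg (fun hc => hall (hall_iff.mp hc)), if_neg (fun hc => hall (hmem.mp hc))]
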